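-- pv_equiv track=rewrite | github.com/paubuyreu27/Python_Quattrocento_RealSense_Picoscope | config_functions.py | select_channels
-- ===== SOURCE A (Python) =====
-- def get_channel_ranges():
--     channel_ranges = {
--         'IN1': range(0, 16),
--         'IN2': range(16, 32),
--         'IN3': range(32, 48),
--         'IN4': range(48, 64),
--         'IN5': range(64, 80),
--         'IN6': range(80, 96),
--         'IN7': range(96, 112),
--         'IN8': range(112, 128),
--         'MULT_IN1': range(128, 192),
--         'MULT_IN2': range(192, 256),
--         'MULT_IN3': range(256, 320),
--         'MULT_IN4': range(320, 384),
--         'AUX_IN1': range(384, 385),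
--         'AUX_IN2': range(385, 386),
--         'AUX_IN3': range(386, 387),
--         'AUX_IN4': range(387, 388),
--         'AUX_IN5': range(388, 389),
--         'AUX_IN6': range(389, 390),
--         'AUX_IN7': range(390, 391),
--         'AUX_IN8': range(391, 392),
--         'AUX_IN9': range(392, 393),
--         'AUX_IN10': range(393, 394),
--         'AUX_IN11': range(394, 395),
--         'AUX_IN12': range(395, 396),
--         'AUX_IN13': range(396, 397),
--         'AUX_IN14': range(397, 398),
--         'AUX_IN15': range(398, 399),
--         'AUX_IN16': range(399, 400),
--     }
--     return channel_ranges
--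
-- def select_channels(inputs):
--     if not isinstance(inputs, list) or not all(isinstance(item, str) for item in inputs):
--         raise TypeError("La entrada debe ser una lista de strings.")
--
--     channel_ranges = get_channel_ranges()
--     channels_to_plot = []
--     invalid_inputs = []
--     for input_string in inputs:
--         if input_string in channel_ranges:
--             channels_to_plot.extend(channel_ranges[input_string])
--         else:
--             invalid_inputs.append(input_string)
--     if invalid_inputs:
--         valid_inputs = ", ".join(channel_ranges.keys())
--         raise ValueError(f"Los siguientes inputs no son válidos: {', '.join(invalid_inputs)}. Las opciones válidas son: {valid_inputs}.")
--     return channels_to_plot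
-- ===== SOURCE B (Python) =====
-- def _decode(name):
--     # Decode a channel name arithmetically instead of looking it up in a table:
--     # INk (k=1..8) -> block of 16 starting at (k-1)*16; MULT_INk (k=1..4) ->
--     # block of 64 starting at 128+(k-1)*64; AUX_INk (k=1..16) -> single channel
--     # 384+(k-1).  Returns (start, width) or None.
--     for prefix, base, width, count in (("MULT_IN", 128, 64, 4),
--                                        ("AUX_IN", 384, 1, 16),
--                                        ("IN", 0, 16, 8)):
--         if name.startswith(prefix):
--             suf = name[len(prefix):]
--             if suf.isdigit() and suf[0] != '0' and 1 <= int(suf) <= count: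
--                 return (base + (int(suf) - 1) * width, width)
--     return None
--
-- def select_channels(inputs):
--     if not isinstance(inputs, list) or not all(isinstance(item, str) for item in inputs):
--         raise TypeError("La entrada debe ser una lista de strings.")
--
--     decoded = [(x, _decode(x)) for x in inputs]
--     invalid_inputs = [x for x, d in decoded if d is None]
--     if invalid_inputs:
--         valid_inputs = ", ".join([f"IN{i}" for i in range(1, 9)]
--                                  + [f"MULT_IN{i}" for i in range(1, 5)]
--                                  + [f"AUX_IN{i}" for i in range(1, 17)])
--         raise ValueError(f"Los siguientes inputs no son válidos: {', '.join(invalid_inputs)}. Las opciones válidas son: {valid_inputs}.")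
--     return [c for _, d in decoded for c in range(d[0], d[0] + d[1])]
-- ===== Notes on version B (the rewrite author's own statement) =====
-- stated objective: alternative
-- what changed: B drops A's 28-entry name->range dictionary entirely: it parses each name as prefix+number (INk / MULT_INk / AUX_INk) and computes the channel block arithmetically as base+(k-1)*width, then validates in one pass and flattens the decoded (start,width) pairs in a second.
import Mathlib
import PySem

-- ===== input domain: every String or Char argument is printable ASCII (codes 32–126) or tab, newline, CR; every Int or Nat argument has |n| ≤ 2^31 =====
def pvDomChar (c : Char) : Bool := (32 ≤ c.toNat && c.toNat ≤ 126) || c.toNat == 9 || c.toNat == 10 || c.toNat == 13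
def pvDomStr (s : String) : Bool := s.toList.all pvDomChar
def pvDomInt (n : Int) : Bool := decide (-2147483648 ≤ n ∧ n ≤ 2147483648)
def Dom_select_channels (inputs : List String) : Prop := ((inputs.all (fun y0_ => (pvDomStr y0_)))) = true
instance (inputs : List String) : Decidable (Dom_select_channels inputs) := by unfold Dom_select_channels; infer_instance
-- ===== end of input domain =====

-- B replaces A's 28-entry range table by an arithmetic name decoder (parse INk /
-- MULT_INk / AUX_INk and compute the block from k); return-value equivalence is
-- proved on Pre_ (all names valid — elsewhere A raises ValueError, and so does B).

-- ===== PORT A =====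
def channelRangesA : PySem.Dict String (List Int) :=
  PySem.Dict.ofList
    [ ("IN1", PySem.List.pyRange 0 16 1), ("IN2", PySem.List.pyRange 16 32 1)
    , ("IN3", PySem.List.pyRange 32 48 1), ("IN4", PySem.List.pyRange 48 64 1)
    , ("IN5", PySem.List.pyRange 64 80 1), ("IN6", PySem.List.pyRange 80 96 1)
    , ("IN7", PySem.List.pyRange 96 112 1), ("IN8", PySem.List.pyRange 112 128 1)
    , ("MULT_IN1", PySem.List.pyRange 128 192 1), ("MULT_IN2", PySem.List.pyRange 192 256 1)
    , ("MULT_IN3", PySem.List.pyRange 256 320 1), ("MULT_IN4", PySem.List.pyRange 320 384 1)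
    , ("AUX_IN1", PySem.List.pyRange 384 385 1), ("AUX_IN2", PySem.List.pyRange 385 386 1)
    , ("AUX_IN3", PySem.List.pyRange 386 387 1), ("AUX_IN4", PySem.List.pyRange 387 388 1)
    , ("AUX_IN5", PySem.List.pyRange 388 389 1), ("AUX_IN6", PySem.List.pyRange 389 390 1)
    , ("AUX_IN7", PySem.List.pyRange 390 391 1), ("AUX_IN8", PySem.List.pyRange 391 392 1)
    , ("AUX_IN9", PySem.List.pyRange 392 393 1), ("AUX_IN10", PySem.List.pyRange 393 394 1)
    , ("AUX_IN11", PySem.List.pyRange 394 395 1), ("AUX_IN12", PySem.List.pyRange 395 396 1)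
    , ("AUX_IN13", PySem.List.pyRange 396 397 1), ("AUX_IN14", PySem.List.pyRange 397 398 1)
    , ("AUX_IN15", PySem.List.pyRange 398 399 1), ("AUX_IN16", PySem.List.pyRange 399 400 1) ]

-- A's loop: extend channels_to_plot on a hit, append to invalid_inputs on a miss.
-- The ValueError path (invalid_inputs nonempty) is excluded by Pre_; the port returns
-- the channels_to_plot component.
def select_channels (inputs : List String) : List Int :=
  (inputs.foldl
    (fun (st : List Int × List String) input_string =>
      if channelRangesA.contains input_string then
        (st.1 ++ channelRangesA.getD input_string [], st.2)
      else
        (st.1, st.2 ++ [input_string]))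
    ([], [])).1

-- ===== PORT B =====
-- one candidate prefix of Source B's _decode loop body
def decodeTry (name pre : String) (base width count : Int) : Option (Int × Int) :=
  if PySem.Str.startswith name pre then
    let suf := PySem.Str.slice name (some (PySem.Str.len pre : Int)) none
    if PySem.Str.strIsdigit suf && !(PySem.Str.pyGet? suf 0 == some '0') then
      match PySem.Int.ofStr? suf with   -- int(suf); isdigit guarantees it parses
      | some k => if 1 ≤ k ∧ k ≤ count then some (base + (k - 1) * width, width) else none
      | none => none
    else none
  else none

-- Source B's _decode: the for-loop with early return over the three prefix triples
def decodeB (name : String) : Option (Int × Int) :=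
  [("MULT_IN", ((128 : Int), (64 : Int), (4 : Int))),
   ("AUX_IN", (384, 1, 16)),
   ("IN", (0, 16, 8))].findSome?
    (fun t => decodeTry name t.1 t.2.1 t.2.2.1 t.2.2.2)

-- Python B's validation pass raises on any undecodable name (excluded by Pre_);
-- the port carries the decode pass and the flattening comprehension.
def select_channels_alt (inputs : List String) : List Int :=
  let decoded := inputs.map (fun x => (x, decodeB x))
  decoded.flatMap (fun p =>
    match p.2 with
    | some d => PySem.List.pyRange d.1 (d.1 + d.2) 1
    | none => [])

-- ===== PRECONDITION & SPEC =====
def validNames : List String :=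
  ["IN1","IN2","IN3","IN4","IN5","IN6","IN7","IN8",
   "MULT_IN1","MULT_IN2","MULT_IN3","MULT_IN4",
   "AUX_IN1","AUX_IN2","AUX_IN3","AUX_IN4","AUX_IN5","AUX_IN6","AUX_IN7","AUX_IN8",
   "AUX_IN9","AUX_IN10","AUX_IN11","AUX_IN12","AUX_IN13","AUX_IN14","AUX_IN15","AUX_IN16"]

-- Pre_ excludes exactly the inputs containing a name that is not a channel key:
-- there A raises ValueError (and Python B raises the same ValueError).
def Pre_select_channels (inputs : List String) : Prop :=
  ∀ s ∈ inputs, s ∈ validNames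
instance (inputs : List String) : Decidable (Pre_select_channels inputs) := by
  unfold Pre_select_channels; infer_instance

def pvWitness_select_channels : List String := ["IN2", "AUX_IN10", "MULT_IN1", "IN2"]

def Spec_select_channels (inputs : List String) (out : List Int) : Prop := out = select_channels_alt inputs
instance (inputs : List String) (out : List Int) : Decidable (Spec_select_channels inputs out) := by unfold Spec_select_channels; infer_instance

-- ===== CLAIM (what is proved, stated in full; the proofs are below) =====
def Claim_equal_select_channels : Prop := ∀ (inputs : List String), Dom_select_channels inputs → Pre_select_channels inputs → Spec_select_channels inputs (select_channels inputs)

-- ===== LEMMAS AND PROOFS =====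

-- Per-name agreement of table lookup and arithmetic decoder over all 28 valid names.
lemma decoder_agrees :
    validNames.all (fun s =>
      channelRangesA.contains s &&
        (channelRangesA.getD s [] ==
          (match decodeB s with
           | some d => PySem.List.pyRange d.1 (d.1 + d.2) 1
           | none => []))) = true := by
  decide

lemma contains_of_valid {s : String} (h : s ∈ validNames) :
    channelRangesA.contains s = true := by
  have := List.all_eq_true.mp decoder_agrees s h
  simp only [Bool.and_eq_true] at this
  exact this.1

lemma getD_of_valid {s : String} (h : s ∈ validNames) :
    channelRangesA.getD s [] =
      (match decodeB s with
       | some d => PySem.List.pyRange d.1 (d.1 + d.2) 1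
       | none => []) := by
  have := List.all_eq_true.mp decoder_agrees s h
  simp only [Bool.and_eq_true] at this
  exact eq_of_beq this.2

-- A's fold, on all-valid suffixes, extends the accumulator by B's flatMap.
lemma foldA_valid (inputs : List String) (h : ∀ s ∈ inputs, s ∈ validNames)
    (acc : List Int) (inv : List String) :
    (inputs.foldl
      (fun (st : List Int × List String) input_string =>
        if channelRangesA.contains input_string then
          (st.1 ++ channelRangesA.getD input_string [], st.2)
        else
          (st.1, st.2 ++ [input_string]))
      (acc, inv)).1
    = acc ++ inputs.flatMap (fun name =>
        match decodeB name with
        | some d => PySem.List.pyRange d.1 (d.1 + d.2) 1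
        | none => []) := by
  induction inputs generalizing acc inv with
  | nil => simp
  | cons x xs ih =>
    have hx : x ∈ validNames := h x (List.mem_cons_self ..)
    have hxs : ∀ s ∈ xs, s ∈ validNames := fun s hs => h s (List.mem_cons_of_mem _ hs)
    rw [List.foldl_cons, if_pos (contains_of_valid hx), ih hxs, getD_of_valid hx]
    simp [List.append_assoc]

-- ===== VERDICT (by name: the statement is the Claim_ definition above) =====
theorem select_channels_spec : Claim_equal_select_channels := by
  intro inputs _ hpre
  unfold Spec_select_channels select_channels select_channels_alt
  simpa [List.flatMap_map, Function.comp] using foldA_valid inputs hpre [] []
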